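-- pv_equiv track=rewrite | github.com/NumberzGame/Additional_difficulty | differences.py | difficulty_of_difference
-- ===== SOURCE A (Python) =====
-- import collections
--
-- def difficulty_of_difference(minuend: int, subtrahend: int, radix: int = 10, cache_size = 3) -> int:
--
--     cache = collections.deque([], maxlen=cache_size)
--
--     m, s = minuend, subtrahend
--
--     if m < s:
--         m, s = s, m
--
--     assert m >= s
--
--     borrow = 0
--     retval = 0
--
--     result, multiplier = 0, 1
--
--     while s > 0 or borrow > 0:
--         m, r_m = divmod(m, radix)
--         s, r_s = divmod(s, radix)
--
--         tuple_ = (r_m, r_s, borrow)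
--
--         r_m -= borrow
--
--         if r_s > r_m:
--             borrow = 1
--         else:
--             borrow = 0
--
--         if r_m == r_s:
--             # Zero difference
--             pass
--         elif r_s + 1 == radix:
--             # subtract 9 <=> add 10 & subtract 1
--             retval += 1
--         elif tuple_ in cache:
--             # Recall result of the same operation, recently done.
--             retval += 1
--         elif 2*r_s == r_m:
--             # Subtract half of self is not so hard.
--             retval += min(r_s, 2)
--         elif r_m % 2 == 0 and r_s % 2 == 0:
--             # subtract 1 if both digits are even
--             retval += max(1, r_s - 1)
--         else:
--             # the borrowed-bit allows larger digits to be subtracted,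
--             # don't add extra difficulty for the borrow.
--             retval += r_s
--             # min(r_m - r_s, r_s)
--
--
--         # Extra operation to add the borrow.
--         retval += borrow
--
--         cache.append(tuple_)
--
--         partial_sum_of_diff = radix*borrow + r_m - r_s
--         result += partial_sum_of_diff*multiplier
--
--
--         # Extra operation to store the borrowed bit
--         retval += borrow
--
--
--         multiplier *= radix
--
--     result += multiplier * m
--
--     assert result == minuend - subtrahend, f'{result=}, {minuend} - {subtrahend}, {borrow=}, {multiplier=}, {radix=}'
--
--     return retval
-- ===== SOURCE B (Python) =====
-- def difficulty_of_difference(minuend: int, subtrahend: int, radix: int = 10, cache_size = 3) -> int: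
--     # Validate inputs: digit subtraction of nonnegative ints in a base >= 2.
--     assert 0 <= subtrahend <= minuend and radix >= 2 and cache_size >= 0
--     # Pass 1: peel digits with borrow propagation, recording each step.
--     m, s = max(minuend, subtrahend), min(minuend, subtrahend)
--     steps = []
--     borrow = 0
--     while s > 0 or borrow > 0:
--         m, r_m = divmod(m, radix)
--         s, r_s = divmod(s, radix)
--         steps.append((r_m, r_s, borrow))
--         borrow = 1 if r_s > r_m - borrow else 0
--     # Pass 2: score the recorded steps with a bounded cache of recent steps.
--     total = 0
--     cache = []
--     for (r_m0, r_s, b) in steps: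
--         r_m = r_m0 - b
--         nb = 1 if r_s > r_m else 0
--         if r_m == r_s:
--             pass
--         elif r_s + 1 == radix:
--             total += 1
--         elif (r_m0, r_s, b) in cache:
--             total += 1
--         elif 2 * r_s == r_m:
--             total += min(r_s, 2)
--         elif r_m % 2 == 0 and r_s % 2 == 0:
--             total += max(1, r_s - 1)
--         else:
--             total += r_s
--         total += 2 * nb
--         cache = cache + [(r_m0, r_s, b)]
--         if len(cache) > cache_size:
--             cache = cache[1:]
--     return total
-- ===== Notes on version B (the rewrite author's own statement) =====
-- stated objective: alternative
-- what changed: B splits A's fused loop into two passes - first extract the (digit, digit, borrow) step list by divmod/borrow propagation, then score that list with a bounded recent-steps cache - dropping A's result/multiplier reconstruction (used only by its assert) and collapsing the two retval += borrow into one + 2*borrow; B validates the natural domain (0 <= subtrahend <= minuend, radix >= 2, cache_size >= 0) with an assert.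
-- outside the precondition, e.g. on difficulty_of_difference(-8, -4, 10, 3): A returns 0, B raises AssertionError; on difficulty_of_difference(5, 0, 0, 3): A returns 0, B raises AssertionError; on difficulty_of_difference(3, 2, -2, 3): A returns 2, B raises AssertionError
import Mathlib
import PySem

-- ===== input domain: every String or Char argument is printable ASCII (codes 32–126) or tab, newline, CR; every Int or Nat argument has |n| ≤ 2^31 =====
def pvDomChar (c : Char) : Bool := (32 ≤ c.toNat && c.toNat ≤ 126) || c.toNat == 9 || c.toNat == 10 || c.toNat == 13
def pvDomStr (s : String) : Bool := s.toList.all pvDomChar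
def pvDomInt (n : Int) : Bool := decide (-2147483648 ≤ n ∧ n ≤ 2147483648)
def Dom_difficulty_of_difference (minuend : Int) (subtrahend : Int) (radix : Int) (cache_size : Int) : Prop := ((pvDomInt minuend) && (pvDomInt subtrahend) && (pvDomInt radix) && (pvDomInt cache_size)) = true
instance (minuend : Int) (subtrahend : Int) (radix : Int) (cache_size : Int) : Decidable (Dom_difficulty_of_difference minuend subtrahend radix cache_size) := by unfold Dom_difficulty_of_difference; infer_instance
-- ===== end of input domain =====

-- B separates digit/borrow extraction (pass 1) from scoring (pass 2), drops the
-- result/multiplier reconstruction A only uses for its assert, and collapses the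
-- two `retval += borrow` into one `+ 2*borrow`; objective: alternative decomposition.

-- ===== PORT A =====
-- deque(maxlen=cache_size).append: drop from the left when over capacity
-- (exact for A, whose cache starts empty and grows one element per append).
def pvDequeApp (cache : List (Int × Int × Int)) (t : Int × Int × Int) (cache_size : Int) :
    List (Int × Int × Int) :=
  let c := cache ++ [t]
  if (c.length : Int) > cache_size then c.tail else c

-- A's fused while-loop; fuel is a totality guard only (the caller passes enough
-- for every input admitted by Pre_).
def pvALoop (radix cache_size : Int) :
    Nat → Int → Int → Int → List (Int × Int × Int) → Int → Int → Int → Int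
  | 0, _, _, _, _, retval, _, _ => retval
  | fuel+1, m, s, borrow, cache, retval, result, multiplier =>
    if s > 0 ∨ borrow > 0 then
      let m' := PySem.Int.floordiv m radix
      let r_m0 := PySem.Int.mod m radix
      let s' := PySem.Int.floordiv s radix
      let r_s := PySem.Int.mod s radix
      let tuple_ := (r_m0, r_s, borrow)
      let r_m := r_m0 - borrow
      let borrow' : Int := if r_s > r_m then 1 else 0
      let retval :=
        if r_m = r_s then retval
        else if r_s + 1 = radix then retval + 1
        else if tuple_ ∈ cache then retval + 1
        else if 2 * r_s = r_m then retval + min r_s 2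
        else if PySem.Int.mod r_m 2 = 0 ∧ PySem.Int.mod r_s 2 = 0 then retval + max 1 (r_s - 1)
        else retval + r_s
      let retval := retval + borrow'
      let cache := pvDequeApp cache tuple_ cache_size
      let partial_sum_of_diff := radix * borrow' + r_m - r_s
      let result := result + partial_sum_of_diff * multiplier
      let retval := retval + borrow'
      let multiplier := multiplier * radix
      pvALoop radix cache_size fuel m' s' borrow' cache retval result multiplier
    else retval

def difficulty_of_difference (minuend : Int) (subtrahend : Int) (radix : Int) (cache_size : Int) : Int :=
  let m := if minuend < subtrahend then subtrahend else minuend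
  let s := if minuend < subtrahend then minuend else subtrahend
  pvALoop radix cache_size (m.toNat + s.toNat + 2) m s 0 [] 0 0 1

-- ===== PORT B =====
-- pass 1: peel digits with borrow propagation, recording each (r_m, r_s, borrow)
def pvSteps (radix : Int) : Nat → Int → Int → Int → List (Int × Int × Int)
  | 0, _, _, _ => []
  | fuel+1, m, s, borrow =>
    if s > 0 ∨ borrow > 0 then
      let r_m := PySem.Int.mod m radix
      let r_s := PySem.Int.mod s radix
      (r_m, r_s, borrow) ::
        pvSteps radix fuel (PySem.Int.floordiv m radix) (PySem.Int.floordiv s radix)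
          (if r_s > r_m - borrow then 1 else 0)
    else []

-- pass 2: score the recorded steps with a bounded cache of recent steps
def pvScore (radix cache_size : Int) :
    List (Int × Int × Int) → List (Int × Int × Int) → Int → Int
  | [], _, total => total
  | (r_m0, r_s, b) :: rest, cache, total =>
    let r_m := r_m0 - b
    let nb : Int := if r_s > r_m then 1 else 0
    let total :=
      if r_m = r_s then total
      else if r_s + 1 = radix then total + 1
      else if (r_m0, r_s, b) ∈ cache then total + 1
      else if 2 * r_s = r_m then total + min r_s 2
      else if PySem.Int.mod r_m 2 = 0 ∧ PySem.Int.mod r_s 2 = 0 then total + max 1 (r_s - 1)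
      else total + r_s
    let total := total + 2 * nb
    let cache := (cache ++ [(r_m0, r_s, b)])
    let cache := if (cache.length : Int) > cache_size then cache.tail else cache
    pvScore radix cache_size rest cache total

def difficulty_of_difference_alt (minuend : Int) (subtrahend : Int) (radix : Int) (cache_size : Int) : Int :=
  let m := max minuend subtrahend
  let s := min minuend subtrahend
  pvScore radix cache_size (pvSteps radix (m.toNat + s.toNat + 2) m s 0) [] 0

-- ===== PRECONDITION & SPEC =====
-- Pre_ is the function's natural domain (which B validates with an assert): digit
-- subtraction of nonnegative ints, 0 <= subtrahend <= minuend, in a genuine base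
-- radix >= 2, with a nonnegative cache size.  Outside it A raises or diverges:
-- AssertionError whenever 0 <= minuend < subtrahend (A's final self-check compares
-- the reconstructed |minuend - subtrahend| against the negative minuend - subtrahend),
-- ValueError for cache_size < 0 (negative deque maxlen), ZeroDivisionError at
-- radix = 0 and divergence at radix = 1 -- except degenerate corners outside the
-- natural domain on which A still returns (subtrahend = 0 or minuend = 2*subtrahend < 0
-- skip the loop and return 0 for any radix; scattered negative-radix inputs terminate
-- with the assert passing): those stay excluded as outside the natural domain and are
-- listed as cited examples (B raises AssertionError there).
def Pre_difficulty_of_difference (minuend : Int) (subtrahend : Int) (radix : Int) (cache_size : Int) : Prop :=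
  0 ≤ subtrahend ∧ subtrahend ≤ minuend ∧ 2 ≤ radix ∧ 0 ≤ cache_size
instance (minuend : Int) (subtrahend : Int) (radix : Int) (cache_size : Int) : Decidable (Pre_difficulty_of_difference minuend subtrahend radix cache_size) := by unfold Pre_difficulty_of_difference; infer_instance

def pvWitness_difficulty_of_difference : Int × Int × Int × Int := (37, 19, 10, 3)

def Spec_difficulty_of_difference (minuend : Int) (subtrahend : Int) (radix : Int) (cache_size : Int) (out : Int) : Prop := out = difficulty_of_difference_alt minuend subtrahend radix cache_size
instance (minuend : Int) (subtrahend : Int) (radix : Int) (cache_size : Int) (out : Int) : Decidable (Spec_difficulty_of_difference minuend subtrahend radix cache_size out) := by unfold Spec_difficulty_of_difference; infer_instance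

-- ===== CLAIM (what is proved, stated in full; the proofs are below) =====
def Claim_equal_difficulty_of_difference : Prop := ∀ (minuend : Int) (subtrahend : Int) (radix : Int) (cache_size : Int), Dom_difficulty_of_difference minuend subtrahend radix cache_size → Pre_difficulty_of_difference minuend subtrahend radix cache_size → Spec_difficulty_of_difference minuend subtrahend radix cache_size (difficulty_of_difference minuend subtrahend radix cache_size)

-- ===== LEMMAS AND PROOFS =====

-- Core invariant: A's fused loop from any state equals B's pass-2 scoring of the
-- pass-1 step list extracted from the same state (result/multiplier are dead for retval).
theorem pvALoop_eq_score (radix cache_size : Int) (fuel : Nat) :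
    ∀ (m s borrow : Int) (cache : List (Int × Int × Int)) (retval result multiplier : Int),
    pvALoop radix cache_size fuel m s borrow cache retval result multiplier =
      pvScore radix cache_size (pvSteps radix fuel m s borrow) cache retval := by
  induction fuel with
  | zero => intro m s borrow cache retval result multiplier; simp [pvALoop, pvSteps, pvScore]
  | succ n ih =>
    intro m s borrow cache retval result multiplier
    by_cases h : s > 0 ∨ borrow > 0
    · simp only [pvALoop, pvSteps, if_pos h, pvScore, pvDequeApp]
      rw [ih]
      ring_nf
    · simp [pvALoop, pvSteps, pvScore, if_neg h]

theorem swap_max (a b : Int) : (if a < b then b else a) = max a b := by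
  rcases lt_or_ge a b with h | h
  · simp [h, max_eq_right h.le]
  · simp [not_lt.mpr h, max_eq_left h]

theorem swap_min (a b : Int) : (if a < b then a else b) = min a b := by
  rcases lt_or_ge a b with h | h
  · simp [h, min_eq_left h.le]
  · simp [not_lt.mpr h, min_eq_right h]

-- ===== VERDICT (by name: the statement is the Claim_ definition above) =====
theorem difficulty_of_difference_spec : Claim_equal_difficulty_of_difference := by
  intro minuend subtrahend radix cache_size _ _
  unfold Spec_difficulty_of_difference difficulty_of_difference difficulty_of_difference_alt
  simp only [swap_max, swap_min]
  exact pvALoop_eq_score _ _ _ _ _ _ _ _ _ _
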